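-- pv_equiv track=rewrite | github.com/Codem-3/Python | 02_Procedural_and_OOP/Examples/01_python_string_reversal.py | simple_encrypt
-- ===== SOURCE A (Python) =====
-- def simple_encrypt(text, key):
--     """Simple encryption using string reversal"""
--     reversed_text = text[::-1]
--     encrypted = ""
--     for char in reversed_text:
--         if char.isalpha():
--             # Shift character by key
--             shifted = chr((ord(char.lower()) - ord("a") + key) % 26 + ord("a"))
--             encrypted += shifted.upper() if char.isupper() else shifted
--         else:
--             encrypted += char
--     return encrypted
-- ===== SOURCE B (Python) =====
-- def simple_encrypt(text, key):
--     """Simple encryption using string reversal (table-driven)."""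
--     lower = "abcdefghijklmnopqrstuvwxyz"
--     upper = "ABCDEFGHIJKLMNOPQRSTUVWXYZ"
--     k = key % 26
--     table = str.maketrans(lower + upper,
--                           lower[k:] + lower[:k] + upper[k:] + upper[:k])
--     return text[::-1].translate(table)
-- ===== Notes on version B (the rewrite author's own statement) =====
-- stated objective: faster
-- what changed: Replaces the per-character isalpha/isupper branching loop with string concatenation by a precomputed 52-entry str.maketrans translation table applied to the reversed string in one translate call.
import Mathlib
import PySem

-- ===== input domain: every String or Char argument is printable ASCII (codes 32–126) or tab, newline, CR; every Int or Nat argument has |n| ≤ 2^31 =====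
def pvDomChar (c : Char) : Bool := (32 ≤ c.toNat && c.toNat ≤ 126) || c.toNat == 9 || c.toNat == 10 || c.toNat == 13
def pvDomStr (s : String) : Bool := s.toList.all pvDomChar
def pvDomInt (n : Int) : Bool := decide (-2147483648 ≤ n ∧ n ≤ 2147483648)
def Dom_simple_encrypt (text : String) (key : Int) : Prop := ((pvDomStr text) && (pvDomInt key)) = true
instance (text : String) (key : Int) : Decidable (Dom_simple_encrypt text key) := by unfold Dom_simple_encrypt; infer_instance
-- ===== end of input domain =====

-- B replaces A's per-character branching loop with a precomputed 52-entry translation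
-- table applied to the reversed string (idiomatic str.maketrans/translate style).

-- ===== PORT A =====
-- the loop body: if char.isalpha(): encrypted += shifted-or-upper else encrypted += char
def aStep (key : Int) (encrypted : String) (char : Char) : String :=
  if PySem.Chars.isalpha char then
    let shifted := Char.ofNat
      ((PySem.Int.mod (((PySem.Chars.lowerChar char).toNat : Int) - ('a'.toNat : Int) + key) 26).toNat
        + 'a'.toNat)
    encrypted.push (if PySem.Chars.isupper char then PySem.Chars.upperChar shifted else shifted)
  else
    encrypted.push char

def simple_encrypt (text : String) (key : Int) : String :=
  -- reversed_text = text[::-1]  (exact: PySem.Str.slice?_none_none_neg_one)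
  let reversed_text := String.ofList text.toList.reverse
  reversed_text.toList.foldl (aStep key) ""

-- ===== PORT B =====
-- table = str.maketrans(lower+upper, lower[k:]+lower[:k]+upper[k:]+upper[:k]), k = key % 26
def mkTable (key : Int) : PySem.Dict Char Char :=
  let lower := "abcdefghijklmnopqrstuvwxyz".toList
  let upper := "ABCDEFGHIJKLMNOPQRSTUVWXYZ".toList
  let k := (PySem.Int.mod key 26).toNat
  (((lower ++ upper).zip
      ((lower.drop k ++ lower.take k) ++ (upper.drop k ++ upper.take k))).foldl
    (fun d p => d.insert p.1 p.2) PySem.Dict.empty)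

def simple_encrypt_alt (text : String) (key : Int) : String :=
  let table := mkTable key
  -- text[::-1].translate(table): chars absent from the table stay unchanged
  String.ofList (text.toList.reverse.map (fun c => table.getD c c))

-- ===== PRECONDITION & SPEC =====
def Spec_simple_encrypt (text : String) (key : Int) (out : String) : Prop := out = simple_encrypt_alt text key
instance (text : String) (key : Int) (out : String) : Decidable (Spec_simple_encrypt text key out) := by unfold Spec_simple_encrypt; infer_instance

-- ===== CLAIM (what is proved, stated in full; the proofs are below) =====
def Claim_equal_simple_encrypt : Prop := ∀ (text : String) (key : Int), Dom_simple_encrypt text key → Spec_simple_encrypt text key (simple_encrypt text key)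

-- ===== LEMMAS AND PROOFS =====

-- what A appends for one character
def aCh (key : Int) (char : Char) : Char :=
  if PySem.Chars.isalpha char then
    let shifted := Char.ofNat
      ((PySem.Int.mod (((PySem.Chars.lowerChar char).toNat : Int) - ('a'.toNat : Int) + key) 26).toNat
        + 'a'.toNat)
    if PySem.Chars.isupper char then PySem.Chars.upperChar shifted else shifted
  else char

lemma aStep_eq (key : Int) (s : String) (c : Char) :
    aStep key s c = s.push (aCh key c) := by
  unfold aStep aCh
  split_ifs <;> rfl

lemma foldA (key : Int) (l : List Char) (s : String) :
    (l.foldl (aStep key) s).toList = s.toList ++ l.map (aCh key) := by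
  induction l generalizing s with
  | nil => simp
  | cons c t ih => simp [aStep_eq, ih]

-- reducing the key to its residue mod 26
lemma mod_add_residue (a key : Int) :
    PySem.Int.mod (a + key) 26 = PySem.Int.mod (a + PySem.Int.mod key 26) 26 := by
  rw [PySem.Int.mod_eq_emod_of_pos (by norm_num),
      PySem.Int.mod_eq_emod_of_pos (by norm_num),
      PySem.Int.mod_eq_emod_of_pos (by norm_num)]
  omega

lemma aCh_residue (key : Int) (c : Char) :
    aCh key c = aCh (PySem.Int.mod key 26) c := by
  unfold aCh
  rw [show (((PySem.Chars.lowerChar c).toNat : Int) - ('a'.toNat : Int) + key)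
        = (((PySem.Chars.lowerChar c).toNat : Int) - ('a'.toNat : Int)) + key by ring,
      mod_add_residue]

lemma mkTable_residue (key : Int) :
    mkTable key = mkTable (PySem.Int.mod key 26) := by
  unfold mkTable
  rw [show PySem.Int.mod (PySem.Int.mod key 26) 26 = PySem.Int.mod key 26 by
    rw [PySem.Int.mod_eq_emod_of_pos (by norm_num),
        PySem.Int.mod_eq_emod_of_pos (by norm_num)]; omega]

-- the finite core: for each residue and each ASCII code point the two per-character
-- results agree
set_option maxRecDepth 4000 in
set_option maxHeartbeats 1000000 in
lemma core : ∀ k : Fin 26, ∀ n : Fin 128,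
    aCh ((k : Nat) : Int) (Char.ofNat (n : Nat))
      = (mkTable ((k : Nat) : Int)).getD (Char.ofNat (n : Nat)) (Char.ofNat (n : Nat)) := by
  decide

lemma char_eq (key : Int) (c : Char) (hc : pvDomChar c = true) :
    aCh key c = (mkTable key).getD c c := by
  have hk : 0 ≤ PySem.Int.mod key 26 ∧ PySem.Int.mod key 26 < 26 := by
    rw [PySem.Int.mod_eq_emod_of_pos (by norm_num)]; omega
  obtain ⟨k, hkeq⟩ : ∃ k : Fin 26, PySem.Int.mod key 26 = ((k : Nat) : Int) :=
    ⟨⟨(PySem.Int.mod key 26).toNat, by omega⟩, by simp; omega⟩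
  have hn : c.toNat < 128 := by
    simp [pvDomChar] at hc
    omega
  obtain ⟨n, hneq⟩ : ∃ n : Fin 128, c = Char.ofNat (n : Nat) :=
    ⟨⟨c.toNat, hn⟩, by simp [Char.ofNat_toNat]⟩
  rw [aCh_residue, mkTable_residue, hkeq, hneq]
  exact core k n

-- ===== VERDICT (by name: the statement is the Claim_ definition above) =====
theorem simple_encrypt_spec : Claim_equal_simple_encrypt := by
  intro text key hdom
  unfold Spec_simple_encrypt simple_encrypt simple_encrypt_alt
  have hdc : ∀ c ∈ text.toList.reverse, pvDomChar c = true := by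
    intro c hc
    have h1 : pvDomStr text = true := by
      have := hdom; unfold Dom_simple_encrypt at this; exact (Bool.and_eq_true_iff.mp this).1
    exact (List.all_eq_true.mp h1) c (List.mem_reverse.mp hc)
  have : (String.ofList text.toList.reverse).toList.foldl (aStep key) "" =
      String.ofList (text.toList.reverse.map (fun c => (mkTable key).getD c c)) := by
    apply String.toList_inj.mp
    rw [foldA]
    simp only [String.toList_ofList, String.toList_empty, List.nil_append]
    exact List.map_congr_left (fun c hc => char_eq key c (hdc c hc))
  exact this
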